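-- pv_equiv track=rewrite | github.com/ItaloPussi/advent-of-code | 2023/day11/main.py | get_galaxy_positions
-- ===== SOURCE A (Python) =====
-- from typing import List, Tuple
--
-- def get_galaxy_positions(universe: List[Tuple[List[Tuple[str, int]], int]]) -> List[Tuple[int, int]]:
--     """
--     Retrieves the positions of galaxies in a compressed cosmic universe.
--
--     Parameters:
--     - universe (List[Tuple[List[Tuple[str, int]], int]]: The 2D list representing the compressed cosmic universe.
--
--     Returns:
--     List[Tuple[int, int]]: Positions of galaxies in the universe.
--     """
--
--     galaxy_positions = []
--     for row_index, row in enumerate(universe):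
--         row_value = row[0]
--         for element_index, element in enumerate(row_value):
--             if element[0] != "#":
--                 continue
--
--             galaxy_x = sum([k[1] for k in universe[0:row_index]])
--             galaxy_y = sum([k[1] for k in row_value[0:element_index]])
--
--             galaxy_positions.append((galaxy_x, galaxy_y))
--     return galaxy_positions
-- ===== SOURCE B (Python) =====
-- def get_galaxy_positions(universe):
--     """One pass with running prefix sums of row/element weights (O(R*C))."""
--     galaxy_positions = []
--     x = 0
--     for row_value, row_weight in universe:
--         y = 0
--         for symbol, weight in row_value:
--             if symbol == "#":
--                 galaxy_positions.append((x, y))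
--             y += weight
--         x += row_weight
--     return galaxy_positions
-- ===== Notes on version B (the rewrite author's own statement) =====
-- stated objective: faster
-- what changed: Replaces the per-galaxy re-summation of universe[0:row_index] and row_value[0:element_index] slices with two running accumulators updated in a single pass.
import Mathlib
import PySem

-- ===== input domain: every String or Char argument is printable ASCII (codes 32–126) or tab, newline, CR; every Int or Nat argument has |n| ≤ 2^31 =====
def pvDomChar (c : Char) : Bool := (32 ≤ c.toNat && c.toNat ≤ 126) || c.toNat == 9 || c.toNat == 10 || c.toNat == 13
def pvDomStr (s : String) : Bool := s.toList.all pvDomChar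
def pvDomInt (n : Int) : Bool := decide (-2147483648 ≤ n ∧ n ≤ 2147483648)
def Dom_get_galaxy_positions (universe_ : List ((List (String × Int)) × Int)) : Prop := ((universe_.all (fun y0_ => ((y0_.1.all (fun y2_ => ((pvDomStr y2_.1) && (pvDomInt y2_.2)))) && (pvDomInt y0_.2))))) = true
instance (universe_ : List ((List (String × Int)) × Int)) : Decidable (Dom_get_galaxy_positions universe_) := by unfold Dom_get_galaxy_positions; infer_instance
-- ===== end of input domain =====

-- B replaces A's per-galaxy slice re-summations with running accumulators: one pass, asymptotically faster.
-- ===== PORT A =====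
def get_galaxy_positions (universe_ : List ((List (String × Int)) × Int)) : List (Int × Int) :=
  (PySem.List.enumerate universe_ 0).foldl (fun acc rp =>
    let row_index := rp.1
    let row_value := rp.2.1
    (PySem.List.enumerate row_value 0).foldl (fun acc2 ep =>
      if ep.2.1 ≠ "#" then acc2
      else
        let galaxy_x := ((PySem.List.slice universe_ (some 0) (some row_index)).map (fun k => k.2)).sum
        let galaxy_y := ((PySem.List.slice row_value (some 0) (some ep.1)).map (fun k => k.2)).sum
        acc2 ++ [(galaxy_x, galaxy_y)]) acc) []

-- ===== PORT B =====
def pvAltRow (gx : Int) : List (String × Int) → Int → List (Int × Int)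
  | [], _ => []
  | (symbol, weight) :: rest, y =>
    (if symbol = "#" then [(gx, y)] else []) ++ pvAltRow gx rest (y + weight)

def pvAltRows : List ((List (String × Int)) × Int) → Int → List (Int × Int)
  | [], _ => []
  | (row_value, row_weight) :: rest, x =>
    pvAltRow x row_value 0 ++ pvAltRows rest (x + row_weight)

def get_galaxy_positions_alt (universe_ : List ((List (String × Int)) × Int)) : List (Int × Int) :=
  pvAltRows universe_ 0

-- ===== PRECONDITION & SPEC =====
def Spec_get_galaxy_positions (universe_ : List ((List (String × Int)) × Int)) (out : List (Int × Int)) : Prop := out = get_galaxy_positions_alt universe_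
instance (universe_ : List ((List (String × Int)) × Int)) (out : List (Int × Int)) : Decidable (Spec_get_galaxy_positions universe_ out) := by unfold Spec_get_galaxy_positions; infer_instance

-- ===== CLAIM (what is proved, stated in full; the proofs are below) =====
def Claim_equal_get_galaxy_positions : Prop := ∀ (universe_ : List ((List (String × Int)) × Int)), Dom_get_galaxy_positions universe_ → Spec_get_galaxy_positions universe_ (get_galaxy_positions universe_)

-- ===== LEMMAS AND PROOFS =====

lemma inner_eq (rv : List (String × Int)) (gx : Int) :
    ∀ (suf : List (String × Int)) (j : Nat) (acc : List (Int × Int)), rv.drop j = suf →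
    (PySem.List.enumerate suf (j : Int)).foldl (fun acc2 ep =>
      if ep.2.1 ≠ "#" then acc2
      else acc2 ++ [(gx, ((PySem.List.slice rv none (some ep.1)).map (fun k => k.2)).sum)]) acc
      = acc ++ pvAltRow gx suf (((rv.take j).map (fun k => k.2)).sum) := by
  intro suf
  induction suf with
  | nil => intro j acc _; simp [PySem.List.enumerate, pvAltRow]
  | cons e rest ih =>
    intro j acc hdrop
    obtain ⟨symbol, weight⟩ := e
    have hget : rv[j]? = some (symbol, weight) := by
      have h0 : rv[j + 0]? = (List.drop j rv)[0]? := List.getElem?_drop.symm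
      simpa [hdrop] using h0
    have htake : rv.take (j + 1) = rv.take j ++ [(symbol, weight)] := by
      rw [List.take_add_one, hget]; rfl
    have hdrop' : rv.drop (j + 1) = rest := by
      have : rv.drop (j + 1) = (rv.drop j).drop 1 := by
        rw [List.drop_drop]
      simp [this, hdrop]
    rw [PySem.List.enumerate_cons, List.foldl_cons]
    have hcast : (j : Int) + 1 = ((j + 1 : Nat) : Int) := by push_cast; ring
    rw [hcast, ih (j + 1) _ hdrop']
    simp only [pvAltRow, htake, PySem.List.slice_to_natCast]
    by_cases hsym : symbol = "#" <;> simp [hsym, List.append_assoc]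

lemma outer_eq (u : List ((List (String × Int)) × Int)) :
    ∀ (suf : List ((List (String × Int)) × Int)) (j : Nat) (acc : List (Int × Int)), u.drop j = suf →
    (PySem.List.enumerate suf (j : Int)).foldl (fun acc rp =>
      (PySem.List.enumerate rp.2.1 0).foldl (fun acc2 ep =>
        if ep.2.1 ≠ "#" then acc2
        else acc2 ++ [(((PySem.List.slice u none (some rp.1)).map (fun k => k.2)).sum,
                       ((PySem.List.slice rp.2.1 none (some ep.1)).map (fun k => k.2)).sum)]) acc) acc
      = acc ++ pvAltRows suf (((u.take j).map (fun k => k.2)).sum) := by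
  intro suf
  induction suf with
  | nil => intro j acc _; simp [PySem.List.enumerate, pvAltRows]
  | cons e rest ih =>
    intro j acc hdrop
    obtain ⟨row_value, row_weight⟩ := e
    have hget : u[j]? = some (row_value, row_weight) := by
      have h0 : u[j + 0]? = (List.drop j u)[0]? := List.getElem?_drop.symm
      simpa [hdrop] using h0
    have htake : u.take (j + 1) = u.take j ++ [(row_value, row_weight)] := by
      rw [List.take_add_one, hget]; rfl
    have hdrop' : u.drop (j + 1) = rest := by
      have : u.drop (j + 1) = (u.drop j).drop 1 := by
        rw [List.drop_drop]
      simp [this, hdrop]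
    rw [PySem.List.enumerate_cons, List.foldl_cons]
    have hinner := inner_eq row_value
      (((u.take j).map (fun k => k.2)).sum) row_value 0 acc rfl
    simp only [List.take_zero, List.map_nil, List.sum_nil, Nat.cast_zero] at hinner
    have hcast : (j : Int) + 1 = ((j + 1 : Nat) : Int) := by push_cast; ring
    simp only [PySem.List.slice_to_natCast]
    rw [hinner, hcast, ih (j + 1) _ hdrop']
    simp [pvAltRows, htake, List.append_assoc]

-- ===== VERDICT =====
theorem get_galaxy_positions_spec : Claim_equal_get_galaxy_positions := by
  intro u _
  unfold Spec_get_galaxy_positions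
  have h := outer_eq u u 0 [] rfl
  simp only [Nat.cast_zero, List.take_zero, List.map_nil, List.sum_nil, List.nil_append] at h
  simp only [get_galaxy_positions, get_galaxy_positions_alt, PySem.List.slice_zero_start]
  exact h
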